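-- pv_equiv track=rewrite | github.com/pd410668/Analysis-of-multi-way-chromatin-interactions-from-very-long-sequencing-reads | digestion.py | digest
-- ===== SOURCE A (Python) =====
-- def division(i, seq, positions) -> str:
--     if i == len(positions): sub_seq = seq[positions[i-1]-1:]
--     elif i == 0: sub_seq = seq[:positions[i]-1]
--     else: sub_seq = seq[positions[i-1]-1:positions[i]-1]
--     return sub_seq
--
-- def digest(input_reads) -> zip:
--     sub_title, sub_seq, sub_qual = [], [], []
--     for title, seq, qual in input_reads:
--         positions = [i for i in range(len(seq)) if seq.startswith("GATC", i)]
--         if positions[0] == 0: positions.pop(0)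
--         if len(positions) != 0:
--             for i in range(0, len(positions)+1):
--                 sub_title.append(f"{i}.{title}")
--                 sub_seq.append(division(i, seq, positions))
--                 sub_qual.append(division(i, qual, positions))
--         else:
--             sub_title.append(title), sub_seq.append(seq), sub_qual.append(qual)
--     return zip(sub_title, sub_seq, sub_qual)
-- ===== SOURCE B (Python) =====
-- def digest(input_reads):
--     # Streaming re-implementation: instead of materialising the full list of GATC
--     # positions and then slicing with a 3-branch helper over three parallel lists,
--     # walk each read once with str.find jumps, emitting a finished (title, seq, qual)
--     # fragment at every cut (one before each site at index > 0) with a running start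
--     # cursor. As in A, a read without any GATC site is an error (seq.index raises).
--     out = []
--     for title, seq, qual in input_reads:
--         start, k = 0, 0
--         p = seq.index("GATC")
--         if p == 0:                 # a site at the very start never yields a cut
--             p = seq.find("GATC", 1)
--         while p != -1:
--             out.append((f"{k}.{title}", seq[start:p - 1], qual[start:p - 1]))
--             start, k = p - 1, k + 1
--             p = seq.find("GATC", p + 1)
--         if k:
--             out.append((f"{k}.{title}", seq[start:], qual[start:]))
--         else:
--             out.append((title, seq, qual))
--     return out
-- ===== Notes on version B (the rewrite author's own statement) =====
-- stated objective: alternative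
-- what changed: B never materialises the position list, the boundary list or A's three parallel lists: it streams each read once with repeated str.find jumps, emitting a finished (title, seq, qual) fragment at every cut with a running start cursor and a trailing-fragment flush, replacing A's scan-all-indices + 3-branch division() helper + zip.
import Mathlib
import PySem

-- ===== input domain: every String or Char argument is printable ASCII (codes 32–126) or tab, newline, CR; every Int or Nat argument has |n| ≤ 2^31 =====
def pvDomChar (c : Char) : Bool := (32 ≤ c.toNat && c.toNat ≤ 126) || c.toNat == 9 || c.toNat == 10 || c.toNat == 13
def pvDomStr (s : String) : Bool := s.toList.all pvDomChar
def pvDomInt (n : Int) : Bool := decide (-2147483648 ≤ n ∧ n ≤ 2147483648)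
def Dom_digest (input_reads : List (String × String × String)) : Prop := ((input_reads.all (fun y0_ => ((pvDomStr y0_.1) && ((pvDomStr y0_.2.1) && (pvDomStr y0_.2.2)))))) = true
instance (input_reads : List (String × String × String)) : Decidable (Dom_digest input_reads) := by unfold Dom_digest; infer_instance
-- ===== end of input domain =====

-- B streams each read with repeated str.find jumps and a running start cursor, emitting
-- finished triples as it goes — no position list, no division() helper, no three
-- parallel lists + zip (objective: alternative decomposition, same asymptotic cost).
-- Shared formatting atom used verbatim by both Pythons: f"{i}.{title}".
def pvFTitle (i : Int) (title : String) : String :=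
  String.ofList (PySem.Int.toChars i ++ '.' :: title.toList)

-- seq.startswith("GATC", i) (exact for the non-negative in-range i A's loop produces)
def pvIsCut (seq : List Char) (i : Int) : Bool :=
  PySem.Chars.startswith (PySem.List.slice seq (some i) none) "GATC".toList

-- ===== PORT A =====
-- division(i, seq, positions); the pyGetD default 0 is dead: digest only calls it with
-- in-range indices (guarded by `len(positions) != 0`).
def pvDivision (i : Int) (seq : List Char) (positions : List Int) : List Char :=
  if i = (positions.length : Int) then
    PySem.List.slice seq (some (PySem.List.pyGetD positions (i - 1) 0 - 1)) none
  else if i = 0 then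
    PySem.List.slice seq none (some (PySem.List.pyGetD positions i 0 - 1))
  else
    PySem.List.slice seq (some (PySem.List.pyGetD positions (i - 1) 0 - 1))
      (some (PySem.List.pyGetD positions i 0 - 1))

-- loop body of A's `for title, seq, qual in input_reads` (state: sub_title, sub_seq, sub_qual)
def pvStepA (st : List String × List String × List String) (r : String × String × String) :
    List String × List String × List String :=
  let seq := r.2.1.toList
  let positions : List Int :=
    (PySem.List.pyRange 0 (seq.length : Int) 1).filter (pvIsCut seq)
  -- `if positions[0] == 0: positions.pop(0)`: when the guard holds the list is nonempty
  -- with head 0, so pop(0) is tail (positions[0] raises on [] — excluded by Pre_)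
  let positions := if PySem.List.pyGet? positions 0 = some 0 then positions.tail else positions
  if positions.length ≠ 0 then
    (PySem.List.pyRange 0 ((positions.length : Int) + 1) 1).foldl
      (fun st i =>
        (st.1 ++ [pvFTitle i r.1],
         st.2.1 ++ [String.ofList (pvDivision i seq positions)],
         st.2.2 ++ [String.ofList (pvDivision i r.2.2.toList positions)])) st
  else
    (st.1 ++ [r.1], st.2.1 ++ [r.2.1], st.2.2 ++ [r.2.2])

def digest (input_reads : List (String × String × String)) : List (String × String × String) :=
  let st := input_reads.foldl pvStepA ([], [], [])
  st.1.zip (st.2.1.zip st.2.2)   -- zip(sub_title, sub_seq, sub_qual)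

-- ===== PORT B =====
-- Source B's while-loop, entered with p = the just-found occurrence index (Python's find
-- result here is always ≥ 1, hence a Nat); returns (out, start, k) at loop exit.
-- The `seq.length ≤ p` disjunct only makes the recursion well-founded: in every state
-- the loop reaches, a find result ≠ -1 lies below seq.length, so it never fires.
def pvLoopB (title : String) (seq qual : List Char)
    (out : List (String × String × String)) (start : Int) (k : Int) (p : Nat) :
    List (String × String × String) × Int × Int :=
  let out := out ++ [(pvFTitle k title,
      String.ofList (PySem.List.slice seq (some start) (some ((p : Int) - 1))),
      String.ofList (PySem.List.slice qual (some start) (some ((p : Int) - 1))))]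
  let q := PySem.Chars.findFrom seq "GATC".toList ((p : Int) + 1) none
  if h : q = -1 ∨ seq.length ≤ p then (out, (p : Int) - 1, k + 1)
  else pvLoopB title seq qual out ((p : Int) - 1) (k + 1) q.toNat
termination_by seq.length - p
decreasing_by
  rcases not_or.mp h with ⟨hq, hp⟩
  have hk1 : p + 1 ≤ seq.length := Nat.not_le.mp hp
  have hcast : ((p + 1 : Nat) : Int) = (p : Int) + 1 := by push_cast; ring
  obtain ⟨hle, hpre, -⟩ := PySem.Chars.findFrom_natCast_spec seq "GATC".toList (p+1) hk1
    (by rw [hcast]; exact hq)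
  rw [hcast] at hle hpre
  have hne : seq.drop (PySem.Chars.findFrom seq "GATC".toList ((p : Int) + 1) none).toNat ≠ [] := by
    intro he; rw [he] at hpre; simp [List.prefix_nil] at hpre
  have hlt : (PySem.Chars.findFrom seq "GATC".toList ((p : Int) + 1) none).toNat < seq.length := by
    by_contra hc; exact hne (List.drop_eq_nil_of_le (by omega))
  omega

-- loop body of Source B's single `for title, seq, qual in input_reads`
def pvStepB (out : List (String × String × String)) (r : String × String × String) :
    List (String × String × String) :=
  let seq := r.2.1.toList
  -- seq.index("GATC"): Python raises ValueError when no site exists (excluded by Pre_);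
  -- ported as find, exact wherever a site exists
  let p0 := PySem.Chars.find seq "GATC".toList
  -- `if p == 0: p = seq.find("GATC", 1)` — a site at the very start never yields a cut
  let p := if p0 = 0 then PySem.Chars.findFrom seq "GATC".toList 1 none else p0
  -- `while p != -1: … ; if k:` — the loop runs (so k ends > 0) iff this first find
  -- succeeds, so Source B's two exits are compiled as this one branch
  if p = -1 then out ++ [(r.1, r.2.1, r.2.2)]
  else
    let res := pvLoopB r.1 seq r.2.2.toList out 0 0 p.toNat
    res.1 ++ [(pvFTitle res.2.2 r.1,
      String.ofList (PySem.List.slice seq (some res.2.1) none),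
      String.ofList (PySem.List.slice r.2.2.toList (some res.2.1) none))]

def digest_alt (input_reads : List (String × String × String)) : List (String × String × String) :=
  input_reads.foldl pvStepB []

-- ===== PRECONDITION & SPEC =====
-- Pre_: A evaluates positions[0] on each read, so it raises IndexError on any read whose
-- sequence contains no "GATC"; exactly those inputs are excluded.
def Pre_digest (input_reads : List (String × String × String)) : Prop :=
  ∀ r ∈ input_reads, PySem.Str.isIn "GATC" r.2.1 = true
instance (input_reads : List (String × String × String)) : Decidable (Pre_digest input_reads) := by unfold Pre_digest; infer_instance
def pvWitness_digest : (List (String × String × String)) := [("r1", "AGATCA", "IIIIII"), ("r2", "GATCGATCGATC", "JJJJJJJJJJJJ"), ("r3", "TTGATCCA", "KKKKKKKK")]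

def Spec_digest (input_reads : List (String × String × String)) (out : List (String × String × String)) : Prop := out = digest_alt input_reads
instance (input_reads : List (String × String × String)) (out : List (String × String × String)) : Decidable (Spec_digest input_reads out) := by unfold Spec_digest; infer_instance

-- ===== CLAIM (what is proved, stated in full; the proofs are below) =====
def Claim_equal_digest : Prop := ∀ (input_reads : List (String × String × String)), Dom_digest input_reads → Pre_digest input_reads → Spec_digest input_reads (digest input_reads)

-- ===== LEMMAS AND PROOFS =====

-- the common shape both programs produce per GATC-containing read: fragments at the
-- cut list, titles counting from k, closed by the trailing fragment
def pvSegs (title : String) (seq qual : List Char) (start : Int) (k : Int) :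
    List Int → List (String × String × String)
  | [] => [(pvFTitle k title,
      String.ofList (PySem.List.slice seq (some start) none),
      String.ofList (PySem.List.slice qual (some start) none))]
  | c :: cs => (pvFTitle k title,
      String.ofList (PySem.List.slice seq (some start) (some c)),
      String.ofList (PySem.List.slice qual (some start) (some c))) ::
      pvSegs title seq qual c (k + 1) cs

theorem pv_foldl_triple {ι α β γ : Type} (l : List ι) (f : ι → α) (g : ι → β) (h : ι → γ)
    (t : List α) (s : List β) (q : List γ) :
    l.foldl (fun st i => (st.1 ++ [f i], st.2.1 ++ [g i], st.2.2 ++ [h i])) (t, s, q)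
      = (t ++ l.map f, s ++ l.map g, q ++ l.map h) := by
  induction l generalizing t s q with
  | nil => simp
  | cons x xs ih => simp [ih]

theorem pv_pop_eq (seq : List Char) :
    (if PySem.List.pyGet? ((PySem.List.pyRange 0 (seq.length : Int) 1).filter (pvIsCut seq)) 0 = some 0
     then ((PySem.List.pyRange 0 (seq.length : Int) 1).filter (pvIsCut seq)).tail
     else (PySem.List.pyRange 0 (seq.length : Int) 1).filter (pvIsCut seq))
      = (PySem.List.pyRange 1 (seq.length : Int) 1).filter (pvIsCut seq) := by
  by_cases hn : seq.length = 0
  · have h0 : (PySem.List.pyRange 0 (seq.length : Int) 1) = [] :=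
      PySem.List.pyRange_one_eq_nil (by omega)
    have h2 : (PySem.List.pyRange 1 (seq.length : Int) 1) = [] :=
      PySem.List.pyRange_one_eq_nil (by omega)
    simp [h0, h2, PySem.List.pyGet?]
  · have hcons : PySem.List.pyRange 0 (seq.length : Int) 1
        = 0 :: PySem.List.pyRange 1 (seq.length : Int) 1 := by
      simpa using PySem.List.pyRange_one_cons (a := 0) (b := (seq.length : Int)) (by omega)
    rw [hcons, List.filter_cons]
    by_cases hc : pvIsCut seq 0
    · simp [hc]
    · simp only [hc, Bool.false_eq_true, if_false]
      cases htp : (PySem.List.pyRange 1 (seq.length : Int) 1).filter (pvIsCut seq) with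
      | nil => simp [PySem.List.pyGet?]
      | cons x xs =>
        have hx : 1 ≤ x := by
          have hm : x ∈ (PySem.List.pyRange 1 (seq.length : Int) 1).filter (pvIsCut seq) := by
            rw [htp]; exact List.mem_cons_self
          exact ((PySem.List.mem_pyRange_one).mp (List.mem_filter.mp hm).1).1
        rw [PySem.List.pyGet?_zero_cons, if_neg (by simp; omega)]

-- pvIsCut at a Nat index is 'GATC is a prefix of the drop'
theorem pv_isCut_iff (seq : List Char) (j : Nat) :
    pvIsCut seq (j : Int) = true ↔ "GATC".toList <+: seq.drop j := by
  unfold pvIsCut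
  rw [PySem.List.slice_from_natCast, PySem.Chars.startswith_iff]

-- prefix at j → j + 4 ≤ length
theorem pv_cut_lt (seq : List Char) (j : Nat) (h : pvIsCut seq (j : Int) = true) :
    j < seq.length := by
  have hp := (pv_isCut_iff seq j).mp h
  have hne : seq.drop j ≠ [] := by
    intro he; rw [he] at hp; simp [List.prefix_nil] at hp
  by_contra hc
  exact hne (List.drop_eq_nil_of_le (by omega))

-- find-vs-filter, empty case: no cut in [i, n) → find from i is -1
theorem pv_find_nil (seq : List Char) (i : Nat) (hi : i ≤ seq.length)
    (h : (PySem.List.pyRange (i : Int) (seq.length : Int) 1).filter (pvIsCut seq) = []) :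
    PySem.Chars.findFrom seq "GATC".toList (i : Int) none = -1 := by
  rw [PySem.Chars.findFrom_natCast_eq_neg_one_iff seq "GATC".toList i hi]
  intro hinf
  obtain ⟨t, hpre, hsuf⟩ := List.infix_iff_prefix_suffix.mp hinf
  have ht := List.suffix_iff_eq_drop.mp hsuf
  set m := (seq.drop i).length - t.length with hm
  have hpd : "GATC".toList <+: seq.drop (i + m) := by
    rw [ht, List.drop_drop] at hpre
    exact hpre
  have hc : pvIsCut seq ((i + m : Nat) : Int) = true := (pv_isCut_iff seq (i+m)).mpr hpd
  have hlt : i + m < seq.length := pv_cut_lt seq (i+m) hc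
  have hmem : ((i + m : Nat) : Int) ∈
      (PySem.List.pyRange (i : Int) (seq.length : Int) 1).filter (pvIsCut seq) :=
    List.mem_filter.mpr ⟨PySem.List.mem_pyRange_one.mpr ⟨by push_cast; omega, by push_cast; omega⟩, hc⟩
  rw [h] at hmem; exact absurd hmem (List.not_mem_nil)

-- find-vs-filter, cons case: find from i is the head of the filtered range
theorem pv_find_cons (seq : List Char) (i : Nat) (hi : i ≤ seq.length)
    (p : Int) (rest : List Int)
    (h : (PySem.List.pyRange (i : Int) (seq.length : Int) 1).filter (pvIsCut seq) = p :: rest) :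
    PySem.Chars.findFrom seq "GATC".toList (i : Int) none = p := by
  have hpm : p ∈ (PySem.List.pyRange (i : Int) (seq.length : Int) 1).filter (pvIsCut seq) := by
    rw [h]; exact List.mem_cons_self
  have hpr := PySem.List.mem_pyRange_one.mp (List.mem_filter.mp hpm).1
  have hpc : pvIsCut seq p = true := (List.mem_filter.mp hpm).2
  have hpt : ((p.toNat : Nat) : Int) = p := by omega
  have hq : PySem.Chars.findFrom seq "GATC".toList (i : Int) none ≠ -1 := by
    intro heq
    apply (PySem.Chars.findFrom_natCast_eq_neg_one_iff seq "GATC".toList i hi).mp heq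
    have hpd : "GATC".toList <+: seq.drop p.toNat := by
      rw [← hpt] at hpc; exact (pv_isCut_iff seq p.toNat).mp hpc
    have : seq.drop p.toNat = (seq.drop i).drop (p.toNat - i) := by
      rw [List.drop_drop]; congr 1; omega
    rw [this] at hpd
    exact List.infix_iff_prefix_suffix.mpr ⟨_, hpd, List.drop_suffix _ _⟩
  obtain ⟨hle, hpre, hmin⟩ := PySem.Chars.findFrom_natCast_spec seq "GATC".toList i hi hq
  set q := PySem.Chars.findFrom seq "GATC".toList (i : Int) none with hqdef
  have hqt : ((q.toNat : Nat) : Int) = q := by omega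
  have hqc : pvIsCut seq q = true := by
    rw [← hqt]; exact (pv_isCut_iff seq q.toNat).mpr hpre
  have hqlt : q.toNat < seq.length := pv_cut_lt seq q.toNat (by rw [hqt]; exact hqc)
  -- q is in the filtered range, whose head p is its least element
  have hqmem : q ∈ (PySem.List.pyRange (i : Int) (seq.length : Int) 1).filter (pvIsCut seq) :=
    List.mem_filter.mpr ⟨PySem.List.mem_pyRange_one.mpr ⟨hle, by omega⟩, hqc⟩
  rw [h] at hqmem
  have hsorted : (p :: rest).Pairwise (· < ·) := by
    rw [← h]; exact (PySem.List.pairwise_lt_pyRange_one _ _).filter _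
  rcases List.mem_cons.mp hqmem with he | hr
  · exact he
  · -- q > p, contradicting minimality of q (p is an earlier cut)
    have hpq : p < q := (List.pairwise_cons.mp hsorted).1 q hr
    exfalso
    apply hmin p.toNat (by omega) (by omega)
    rw [← hpt] at hpc; exact (pv_isCut_iff seq p.toNat).mp hpc

-- dropping the head of a filtered range refilters from past the head
theorem pv_filter_tail (seq : List Char) (a : Int) (p : Int) (rest : List Int)
    (h : (PySem.List.pyRange a (seq.length : Int) 1).filter (pvIsCut seq) = p :: rest) :
    (PySem.List.pyRange (p + 1) (seq.length : Int) 1).filter (pvIsCut seq) = rest := by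
  have hpm : p ∈ (PySem.List.pyRange a (seq.length : Int) 1).filter (pvIsCut seq) := by
    rw [h]; exact List.mem_cons_self
  have hpr := PySem.List.mem_pyRange_one.mp (List.mem_filter.mp hpm).1
  have hsplit : PySem.List.pyRange a (seq.length : Int) 1
      = PySem.List.pyRange a p 1 ++ PySem.List.pyRange p (p + 1) 1
        ++ PySem.List.pyRange (p + 1) (seq.length : Int) 1 := by
    rw [← PySem.List.pyRange_one_append a p (p+1) hpr.1 (by omega),
        ← PySem.List.pyRange_one_append a (p+1) (seq.length : Int) (by omega) (by omega)]
  rw [hsplit] at h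
  rw [PySem.List.pyRange_one_singleton] at h
  simp only [List.filter_append] at h
  have hlow : (PySem.List.pyRange a p 1).filter (pvIsCut seq) = [] := by
    cases hlp : (PySem.List.pyRange a p 1).filter (pvIsCut seq) with
    | nil => rfl
    | cons y ys =>
      exfalso
      have hy : y ∈ (PySem.List.pyRange a p 1).filter (pvIsCut seq) := by
        rw [hlp]; exact List.mem_cons_self
      have hyr := PySem.List.mem_pyRange_one.mp (List.mem_filter.mp hy).1
      rw [hlp] at h
      have hh := congrArg List.head? h
      simp at hh
      omega
  rw [hlow, List.nil_append, List.filter_cons] at h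
  by_cases hpc : pvIsCut seq p = true
  · rw [if_pos hpc] at h
    exact (List.cons_inj_right _).mp h
  · rw [if_neg (by simp [hpc])] at h
    cases hhp : (PySem.List.pyRange (p+1) (seq.length : Int) 1).filter (pvIsCut seq) with
    | nil => rw [hhp] at h; exact absurd h (by simp)
    | cons z zs =>
      exfalso
      have hz : z ∈ (PySem.List.pyRange (p+1) (seq.length : Int) 1).filter (pvIsCut seq) := by
        rw [hhp]; exact List.mem_cons_self
      have hzr := PySem.List.mem_pyRange_one.mp (List.mem_filter.mp hz).1
      rw [hhp] at h
      have hh := congrArg List.head? h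
      simp at hh
      omega

-- Source B's index-then-maybe-refind start value equals one find from index 1
theorem pv_index_eq (seq : List Char) (h1 : 1 ≤ seq.length) :
    (if PySem.Chars.find seq "GATC".toList = 0
     then PySem.Chars.findFrom seq "GATC".toList 1 none
     else PySem.Chars.find seq "GATC".toList)
      = PySem.Chars.findFrom seq "GATC".toList 1 none := by
  by_cases h0 : PySem.Chars.find seq "GATC".toList = 0
  · rw [if_pos h0]
  · rw [if_neg h0]
    have hcons : PySem.List.pyRange 0 (seq.length : Int) 1
        = 0 :: PySem.List.pyRange 1 (seq.length : Int) 1 := by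
      simpa using PySem.List.pyRange_one_cons (a := 0) (b := (seq.length : Int)) (by omega)
    have hc0 : pvIsCut seq 0 ≠ true := by
      intro hc
      apply h0
      have : (PySem.List.pyRange (0 : Int) (seq.length : Int) 1).filter (pvIsCut seq)
          = 0 :: (PySem.List.pyRange 1 (seq.length : Int) 1).filter (pvIsCut seq) := by
        rw [hcons, List.filter_cons, if_pos hc]
      have hf := pv_find_cons seq 0 (by omega) 0 _ (by push_cast; exact this)
      simpa using hf
    have hfil : (PySem.List.pyRange (0 : Int) (seq.length : Int) 1).filter (pvIsCut seq)
        = (PySem.List.pyRange 1 (seq.length : Int) 1).filter (pvIsCut seq) := by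
      rw [hcons, List.filter_cons, if_neg hc0]
    cases hps : (PySem.List.pyRange 1 (seq.length : Int) 1).filter (pvIsCut seq) with
    | nil =>
      have ha := pv_find_nil seq 0 (by omega) (by push_cast; rw [hfil]; exact hps)
      have hb := pv_find_nil seq 1 h1 (by push_cast; exact hps)
      push_cast at ha hb
      rw [PySem.Chars.findFrom_zero] at ha
      exact ha.trans hb.symm
    | cons x xs =>
      have ha := pv_find_cons seq 0 (by omega) x xs (by push_cast; rw [hfil]; exact hps)
      have hb := pv_find_cons seq 1 h1 x xs (by push_cast; exact hps)
      push_cast at ha hb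
      rw [PySem.Chars.findFrom_zero] at ha
      exact ha.trans hb.symm

-- B's loop, run from a found occurrence p with the remaining cuts known, produces pvSegs
theorem pv_loopB_spec (title : String) (seq qual : List Char) :
    ∀ (rest : List Int) (p : Nat) (out : List (String × String × String)) (start k : Int),
    (PySem.List.pyRange ((p : Int) + 1) (seq.length : Int) 1).filter (pvIsCut seq) = rest →
    p < seq.length →
    (let res := pvLoopB title seq qual out start k p
     res.1 ++ [(pvFTitle res.2.2 title,
       String.ofList (PySem.List.slice seq (some res.2.1) none),
       String.ofList (PySem.List.slice qual (some res.2.1) none))])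
      = out ++ pvSegs title seq qual start k (((p : Int) :: rest).map (· - 1)) := by
  intro rest
  induction rest with
  | nil =>
    intro p out start k hfil hp
    rw [pvLoopB]
    have hfind : PySem.Chars.findFrom seq "GATC".toList ((p : Int) + 1) none = -1 := by
      have := pv_find_nil seq (p+1) (by omega) (by push_cast; exact hfil)
      push_cast at this ⊢; exact this
    simp only [hfind, true_or, dif_pos]
    simp [pvSegs]
  | cons p' rest' ih =>
    intro p out start k hfil hp
    rw [pvLoopB]
    have hp'm : p' ∈ (PySem.List.pyRange ((p : Int) + 1) (seq.length : Int) 1).filter (pvIsCut seq) := by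
      rw [hfil]; exact List.mem_cons_self
    have hp'r := PySem.List.mem_pyRange_one.mp (List.mem_filter.mp hp'm).1
    have hfind : PySem.Chars.findFrom seq "GATC".toList ((p : Int) + 1) none = p' := by
      have := pv_find_cons seq (p+1) (by omega) p' rest' (by push_cast; exact hfil)
      push_cast at this ⊢; exact this
    have hcond : ¬ (PySem.Chars.findFrom seq "GATC".toList ((p : Int) + 1) none = -1
        ∨ seq.length ≤ p) := by
      rw [not_or]; exact ⟨by rw [hfind]; omega, by omega⟩
    simp only [hcond, dif_neg, not_false_iff]
    rw [hfind]
    have hp't : ((p'.toNat : Nat) : Int) = p' := by omega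
    have htail : (PySem.List.pyRange ((p'.toNat : Int) + 1) (seq.length : Int) 1).filter (pvIsCut seq) = rest' := by
      rw [hp't]; exact pv_filter_tail seq _ p' rest' hfil
    have := ih p'.toNat (out ++ [(pvFTitle k title,
        String.ofList (PySem.List.slice seq (some start) (some ((p : Int) - 1))),
        String.ofList (PySem.List.slice qual (some start) (some ((p : Int) - 1))))])
      ((p : Int) - 1) (k + 1) htail (by omega)
    rw [this, hp't]
    simp [pvSegs]

-- pvSegs elementwise: titles count up, bounds are consecutive entries of start :: cuts
theorem pvSegs_length (title : String) (seq qual : List Char) (cuts : List Int)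
    (start k : Int) : (pvSegs title seq qual start k cuts).length = cuts.length + 1 := by
  induction cuts generalizing start k with
  | nil => rfl
  | cons c cs ih => simp [pvSegs, ih]

theorem pvSegs_getElem (title : String) (seq qual : List Char) :
    ∀ (cuts : List Int) (start k : Int) (j : Nat) (hj : j < cuts.length + 1),
    (pvSegs title seq qual start k cuts)[j]'(by rw [pvSegs_length]; omega)
      = (pvFTitle (k + (j : Int)) title,
         String.ofList (PySem.List.slice seq ((start :: cuts)[j]?) (cuts[j]?)),
         String.ofList (PySem.List.slice qual ((start :: cuts)[j]?) (cuts[j]?))) := by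
  intro cuts
  induction cuts with
  | nil =>
    intro start k j hj
    have hj0 : j = 0 := by simp at hj; omega
    subst hj0
    simp [pvSegs]
  | cons c cs ih =>
    intro start k j hj
    cases j with
    | zero => simp [pvSegs]
    | succ j' =>
      have := ih c (k + 1) j' (by simpa using Nat.lt_of_succ_lt_succ hj)
      simp only [pvSegs, List.getElem_cons_succ, this]
      congr 2
      push_cast; ring

theorem getElem_idx_congr {α : Type} (l : List α) (i j : Nat) (h : i = j) (hi : i < l.length) :
    l[i]'hi = l[j]'(h ▸ hi) := by subst h; rfl

theorem cons_map_getElem? (ps : List Int) (j : Nat) (hj1 : 1 ≤ j) (hj2 : j ≤ ps.length) :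
    (((0 : Int) :: ps.map (· - 1)))[j]? = some (ps[j - 1]'(by omega) - 1) := by
  obtain ⟨n, hn⟩ : ∃ n, j = n + 1 := ⟨j - 1, by omega⟩
  subst hn
  rw [List.getElem?_cons_succ, List.getElem?_map,
      List.getElem?_eq_getElem (by omega : n < ps.length)]
  simp only [Option.map_some, Nat.add_sub_cancel]

theorem map_sub_getElem? (ps : List Int) (j : Nat) (hj : j < ps.length) :
    ((ps.map (· - 1)))[j]? = some (ps[j]'hj - 1) := by
  rw [List.getElem?_map, List.getElem?_eq_getElem hj]
  simp

-- division(k, xs, ps) in terms of consecutive entries of 0 :: (ps - 1)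
theorem pv_division_eq (xs : List Char) (ps : List Int) (hne : ps ≠ []) (k : Nat)
    (hk : k ≤ ps.length) :
    pvDivision (k : Int) xs ps
      = PySem.List.slice xs ((((0 : Int) :: ps.map (· - 1)))[k]?) ((ps.map (· - 1))[k]?) := by
  have hm : 1 ≤ ps.length := by
    cases ps with
    | nil => exact absurd rfl hne
    | cons a l => simp
  unfold pvDivision
  by_cases hkm : k = ps.length
  · subst hkm
    rw [if_pos rfl]
    rw [PySem.List.pyGetD_eq_getElem ps 0 (by omega) (by omega)]
    have e1 : ((ps.length : Int) - 1).toNat = ps.length - 1 := by omega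
    rw [getElem_idx_congr ps _ _ e1]
    rw [cons_map_getElem? ps ps.length hm (by omega)]
    rw [show ((ps.map (· - 1)))[ps.length]? = none by rw [List.getElem?_eq_none]; simp]
  · by_cases hk0 : k = 0
    · subst hk0
      rw [if_neg (by omega), if_pos (by norm_num)]
      rw [PySem.List.pyGetD_eq_getElem ps 0 (by omega) (by push_cast; omega)]
      rw [map_sub_getElem? ps 0 (by omega)]
      simp [PySem.List.slice_zero_start]
    · rw [if_neg (by omega), if_neg (by omega)]
      have e1 : ((k : Int) - 1).toNat = k - 1 := by omega
      have e2 : ((k : Int)).toNat = k := by omega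
      rw [PySem.List.pyGetD_eq_getElem ps 0 (by omega) (by omega),
          PySem.List.pyGetD_eq_getElem ps 0 (by omega) (by omega)]
      rw [getElem_idx_congr ps _ _ e1, getElem_idx_congr ps _ _ e2]
      rw [cons_map_getElem? ps k (by omega) hk, map_sub_getElem? ps k (by omega)]

-- A's fragment list (map of division over the index range) is pvSegs as well
theorem pv_division_segs (title : String) (seq qual : List Char) (ps : List Int)
    (hne : ps ≠ []) :
    ((PySem.List.pyRange 0 ((ps.length : Int) + 1) 1).map
      (fun i => (pvFTitle i title, String.ofList (pvDivision i seq ps),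
                 String.ofList (pvDivision i qual ps))))
      = pvSegs title seq qual 0 0 (ps.map (· - 1)) := by
  apply List.ext_getElem
  · rw [pvSegs_length]
    simp [PySem.List.length_pyRange_one]
  · intro j h1 h2
    have h1' : j < (PySem.List.pyRange 0 ((ps.length : Int) + 1) 1).length := by
      simpa using h1
    have hj : j ≤ ps.length := by
      simp [PySem.List.length_pyRange_one] at h1'
      omega
    have hr : (PySem.List.pyRange 0 ((ps.length : Int) + 1) 1)[j]'h1' = (j : Int) := by
      rw [PySem.List.getElem_pyRange_one]; ring
    rw [List.getElem_map, hr]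
    rw [pvSegs_getElem title seq qual (ps.map (· - 1)) 0 0 j (by simp; omega)]
    rw [pv_division_eq seq ps hne j hj, pv_division_eq qual ps hne j hj]
    norm_num

-- per-read bridge: A's triple step zipped equals B's step, and lengths stay equal
theorem pv_step_bridge (t s q : List String) (hs : s.length = t.length)
    (hq : q.length = t.length) (r : String × String × String)
    (hpre : PySem.Str.isIn "GATC" r.2.1 = true) :
    (pvStepA (t, s, q) r).1.zip ((pvStepA (t, s, q) r).2.1.zip (pvStepA (t, s, q) r).2.2)
      = pvStepB (t.zip (s.zip q)) r
    ∧ (pvStepA (t, s, q) r).2.1.length = (pvStepA (t, s, q) r).1.length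
    ∧ (pvStepA (t, s, q) r).2.2.length = (pvStepA (t, s, q) r).1.length := by
  obtain ⟨title, sq, ql⟩ := r
  have hsq : s.length = q.length := hs.trans hq.symm
  have htz : t.length = (s.zip q).length := by simp [List.length_zip]; omega
  simp only [pvStepA, pvStepB]
  rw [pv_pop_eq]
  have hn1 : 1 ≤ sq.toList.length := by
    -- Pre_ guarantees a GATC occurrence, so seq is nonempty
    have hinf : "GATC".toList <:+: sq.toList :=
      (PySem.Chars.isIn_iff_infix _ _).mp (by simpa using hpre)
    have h4 : ("GATC".toList).length ≤ sq.toList.length := hinf.length_le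
    have he : ("GATC".toList).length = 4 := rfl
    omega
  rw [pv_index_eq sq.toList hn1]
  cases hps : (PySem.List.pyRange 1 ((sq.toList.length : Int)) 1).filter (pvIsCut sq.toList) with
  | nil =>
    -- no cut beyond index 0: A appends the bare read; B's first find fails
    have hfind : PySem.Chars.findFrom sq.toList "GATC".toList (1 : Int) none = -1 := by
      have := pv_find_nil sq.toList 1 hn1 (by push_cast; exact hps)
      push_cast at this ⊢; exact this
    simp only [List.length_nil, ne_eq, not_true_eq_false, if_false]
    rw [if_pos hfind]
    refine ⟨?_, by simp [hs], by simp [hq]⟩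
    rw [List.zip_append hsq, List.zip_append htz]
    simp
  | cons p rest =>
    have hpm : p ∈ (PySem.List.pyRange 1 ((sq.toList.length : Int)) 1).filter (pvIsCut sq.toList) := by
      rw [hps]; exact List.mem_cons_self
    have hpr := PySem.List.mem_pyRange_one.mp (List.mem_filter.mp hpm).1
    have hfind : PySem.Chars.findFrom sq.toList "GATC".toList (1 : Int) none = p := by
      have := pv_find_cons sq.toList 1 hn1 p rest (by push_cast; exact hps)
      push_cast at this ⊢; exact this
    have hpt : ((p.toNat : Nat) : Int) = p := by omega
    rw [if_pos (by simp), if_neg (by rw [hfind]; omega)]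
    rw [pv_foldl_triple]
    have htl : (PySem.List.pyRange ((p.toNat : Int) + 1) ((sq.toList.length : Int)) 1).filter (pvIsCut sq.toList) = rest := by
      rw [hpt]; exact pv_filter_tail sq.toList 1 p rest hps
    have hloop := pv_loopB_spec title sq.toList ql.toList rest p.toNat
      (t.zip (s.zip q)) 0 0 htl (by omega)
    refine ⟨?_, by simp [hs], by simp [hq]⟩
    rw [List.zip_append hsq, List.zip_append htz, List.zip_map', List.zip_map']
    rw [hfind, hloop, hpt]
    rw [pv_division_segs title sq.toList ql.toList (p :: rest) (by simp)]

-- fold the per-read bridge over the whole input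
theorem pv_main (reads : List (String × String × String)) (t s q : List String)
    (hs : s.length = t.length) (hq : q.length = t.length)
    (hpre : ∀ r ∈ reads, PySem.Str.isIn "GATC" r.2.1 = true) :
    (reads.foldl pvStepA (t, s, q)).1.zip
        ((reads.foldl pvStepA (t, s, q)).2.1.zip (reads.foldl pvStepA (t, s, q)).2.2)
      = reads.foldl pvStepB (t.zip (s.zip q)) := by
  induction reads generalizing t s q with
  | nil => rfl
  | cons r rs ih =>
    have h := pv_step_bridge t s q hs hq r (hpre r List.mem_cons_self)
    simp only [List.foldl_cons]
    have e := ih (pvStepA (t, s, q) r).1 (pvStepA (t, s, q) r).2.1 (pvStepA (t, s, q) r).2.2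
      h.2.1 h.2.2 (fun x hx => hpre x (List.mem_cons_of_mem _ hx))
    simpa [h.1] using e

-- ===== VERDICT (by name: the statement is the Claim_ definition above) =====
theorem digest_spec : Claim_equal_digest := by
  intro reads _ hpre
  unfold Spec_digest digest digest_alt
  simpa using pv_main reads [] [] [] rfl rfl hpre
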